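-- pv_equiv track=rewrite | github.com/nailec1911/advent-of-code | 2024/day_25/day_25.py | to_vals
-- ===== SOURCE A (Python) =====
-- def to_vals(blocks, is_key):
--     res = []
--     for key in blocks:
--         res.append([])
--         for i in range(len(key[0])):
--             j = 0
--             while j < len(key) and key[-(j + 1) if is_key else j][i] == '#':
--                 j += 1
--             res[-1].append(j - 1)
--     return res
-- ===== SOURCE B (Python) =====
-- def to_vals(blocks, is_key):
--     res = []
--     for key in blocks:
--         width = len(key[0])
--         counts = [0] * width
--         active = [True] * width
--         for row in (reversed(key) if is_key else key):
--             counts = [counts[i] + 1 if active[i] and row[i] == '#' else counts[i]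
--                       for i in range(width)]
--             active = [active[i] and row[i] == '#' for i in range(width)]
--         res.append([c - 1 for c in counts])
--     return res
-- ===== Notes on version B (the rewrite author's own statement) =====
-- stated objective: alternative
-- what changed: A's per-column while-loop rescans are replaced by a single row-major pass per block that rebuilds a counts list and an active-column boolean mask with two comprehensions per row.
import Mathlib
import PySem

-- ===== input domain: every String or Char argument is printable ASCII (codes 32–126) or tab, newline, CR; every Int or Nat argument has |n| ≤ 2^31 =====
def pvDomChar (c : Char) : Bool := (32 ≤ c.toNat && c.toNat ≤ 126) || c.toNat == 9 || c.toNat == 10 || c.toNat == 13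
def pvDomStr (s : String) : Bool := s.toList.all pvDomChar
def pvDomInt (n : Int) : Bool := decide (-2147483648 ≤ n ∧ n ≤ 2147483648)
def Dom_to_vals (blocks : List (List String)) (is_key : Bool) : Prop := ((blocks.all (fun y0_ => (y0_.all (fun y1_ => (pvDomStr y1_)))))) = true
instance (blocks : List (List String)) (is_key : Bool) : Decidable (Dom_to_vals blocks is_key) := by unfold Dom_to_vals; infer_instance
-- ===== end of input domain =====

-- B replaces A's per-column while-loop rescans by one row-major pass per block maintaining a counts list and an active-column mask (alternative decomposition, same cost).


-- ===== PORT A =====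
-- A's inner while loop: starting at j, count rows whose column-i char is '#', walking from the bottom (is_key) or the top
def aCol (key : List String) (is_key : Bool) (i : Int) (j : Nat) : Nat :=
  if h : j < key.length ∧
      PySem.Str.pyGet? (PySem.List.pyGetD key (if is_key then -((j : Int) + 1) else (j : Int)) "") i = some '#'
  then aCol key is_key i (j + 1)
  else j
  termination_by key.length - j
  decreasing_by omega

def to_vals (blocks : List (List String)) (is_key : Bool) : List (List Int) :=
  blocks.foldl (fun res key =>
    res ++ [ (PySem.List.pyRange 0 (PySem.Str.len (PySem.List.pyGetD key 0 "")) 1).foldl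
      (fun col i => col ++ [ ((aCol key is_key i 0 : Nat) : Int) - 1 ]) [] ]) []

-- ===== PORT B =====
-- one row of B's row-major pass: rebuild counts and the active mask by the two comprehensions over range(width)
def bStep (w : Int) (st : List Int × List Bool) (row : String) : List Int × List Bool :=
  ((PySem.List.pyRange 0 w 1).map (fun i =>
      if PySem.List.pyGetD st.2 i false && (PySem.Str.pyGet? row i == some '#')
      then PySem.List.pyGetD st.1 i 0 + 1 else PySem.List.pyGetD st.1 i 0),
   (PySem.List.pyRange 0 w 1).map (fun i =>
      PySem.List.pyGetD st.2 i false && (PySem.Str.pyGet? row i == some '#')))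

def to_vals_alt (blocks : List (List String)) (is_key : Bool) : List (List Int) :=
  blocks.foldl (fun res key =>
    let width := PySem.Str.len (PySem.List.pyGetD key 0 "")
    let rows := if is_key then key.reverse else key
    let st := rows.foldl (bStep width) (List.replicate width.toNat 0, List.replicate width.toNat true)
    res ++ [st.1.map (fun c => c - 1)]) []

-- ===== PRECONDITION & SPEC =====
-- Pre_ is exactly the condition under which Python A (and likewise B) raises no IndexError: every block is
-- nonempty, and in every column k of a block, any row the top-down (or bottom-up, for keys) all-'#' walk
-- reaches is at least k+1 characters long.  It excludes no input on which A returns.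
def Pre_to_vals (blocks : List (List String)) (is_key : Bool) : Prop :=
  ∀ key ∈ blocks, key ≠ [] ∧
    ∀ k < (PySem.List.pyGetD key 0 "").toList.length,
      ∀ j < (if is_key then key.reverse else key).length,
        (∀ t < j, ((if is_key then key.reverse else key).getD t "").toList.getD k ' ' = '#') →
          k < ((if is_key then key.reverse else key).getD j "").toList.length

instance (blocks : List (List String)) (is_key : Bool) : Decidable (Pre_to_vals blocks is_key) := by
  unfold Pre_to_vals; infer_instance

def pvWitness_to_vals : List (List String) × Bool := ([["#.", "##"], ["..", "#."]], true)

def Spec_to_vals (blocks : List (List String)) (is_key : Bool) (out : List (List Int)) : Prop := out = to_vals_alt blocks is_key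
instance (blocks : List (List String)) (is_key : Bool) (out : List (List Int)) : Decidable (Spec_to_vals blocks is_key out) := by unfold Spec_to_vals; infer_instance

-- ===== CLAIM (what is proved, stated in full; the proofs are below) =====
def Claim_equal_to_vals : Prop := ∀ (blocks : List (List String)) (is_key : Bool), Dom_to_vals blocks is_key → Pre_to_vals blocks is_key → Spec_to_vals blocks is_key (to_vals blocks is_key)

-- ===== LEMMAS AND PROOFS =====
-- The two ports agree on every input (both read an out-of-range character as "not '#'"), so the
-- equivalence below is proved unconditionally; Pre_ is carried only to mirror where Python A returns.

-- the column-k predicate both sides reduce to: "char k of this row is '#'" (out of range reads as not '#')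
def colHash (k : Nat) (r : List Char) : Bool := r.getD k ' ' == '#'

theorem optChar_eq (o : Option Char) : (o = some '#') ↔ (o.getD ' ' == '#') = true := by
  cases o <;> simp

theorem colHash_char (k : Nat) (r : String) :
    (PySem.Str.pyGet? r (k : Int) = some '#') ↔ colHash k r.toList = true := by
  rw [PySem.Str.pyGet?_natCast, colHash, List.getD_eq_getElem?_getD]
  exact optChar_eq _

theorem bStep_eq (w : Nat) (f : Nat → Int) (g : Nat → Bool) (row : String) :
    bStep (w : Int) ((List.range w).map f, (List.range w).map g) row
      = ((List.range w).map (fun i => if g i && colHash i row.toList then f i + 1 else f i),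
         (List.range w).map (fun i => g i && colHash i row.toList)) := by
  show (_, _) = _
  rw [PySem.List.pyRange_zero_natCast, List.map_map, List.map_map]
  have hch : ∀ k : Nat, (PySem.Str.pyGet? row (k : Int) == some '#') = colHash k row.toList := by
    intro k
    rw [PySem.Str.pyGet?_natCast, colHash, List.getD_eq_getElem?_getD]
    cases row.toList[k]? <;> rfl
  have hpt : ∀ k, k < w →
      (PySem.List.pyGetD ((List.range w).map g) (k : Int) false
        && (PySem.Str.pyGet? row (k : Int) == some '#'))
      = (g k && colHash k row.toList) := by
    intro k hk
    rw [PySem.List.pyGetD_natCast, List.getD_eq_getElem _ _ (by simpa using hk), hch k]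
    simp
  refine congrArg₂ Prod.mk (List.map_congr_left ?_) (List.map_congr_left ?_) <;>
    intro k hk <;> have hk' : k < w := List.mem_range.mp hk
  · rw [Function.comp_apply, hpt k hk', PySem.List.pyGetD_natCast,
        List.getD_eq_getElem _ _ (by simpa using hk')]
    simp
  · rw [Function.comp_apply, hpt k hk']

theorem bFold_eq (rows : List String) (w : Nat) (f : Nat → Int) (g : Nat → Bool) :
    rows.foldl (bStep (w : Int)) ((List.range w).map f, (List.range w).map g)
      = ((List.range w).map (fun i =>
            f i + if g i then ((rows.takeWhile (fun r => colHash i r.toList)).length : Int) else 0),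
         (List.range w).map (fun i => g i && rows.all (fun r => colHash i r.toList))) := by
  induction rows generalizing f g with
  | nil => simp
  | cons r rs ih =>
    rw [List.foldl_cons, bStep_eq w f g r, ih]
    refine congrArg₂ Prod.mk (List.map_congr_left ?_) (List.map_congr_left ?_) <;> intro i _
    · by_cases hg : g i <;> by_cases hq : colHash i r.toList <;>
        simp [hg, hq] <;> push_cast <;> ring
    · by_cases hq : colHash i r.toList <;> simp [hq]

theorem rowFetch (key : List String) (is_key : Bool) (j : Nat) (hj : j < key.length) :
    PySem.List.pyGetD key (if is_key then -((j : Int) + 1) else (j : Int)) ""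
      = (if is_key then key.reverse else key).getD j "" := by
  cases is_key with
  | false => simp
  | true =>
    have h1 : -((j : Int) + 1) = -(((j + 1 : Nat) : Int)) := by push_cast; ring
    simp only [if_true]
    rw [h1, PySem.List.pyGetD_neg_natCast key (j + 1) "" (Nat.succ_pos j) (by omega)]
    rw [List.getD_eq_getElem _ _ (by simpa using hj), List.getElem_reverse]
    congr 1
    omega

theorem aCol_eq (key : List String) (is_key : Bool) (k : Nat) :
    ∀ n j, key.length - j = n → j ≤ key.length →
      aCol key is_key (k : Int) j
        = j + (((if is_key then key.reverse else key).drop j).takeWhile (fun r => colHash k r.toList)).length := by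
  intro n
  induction n with
  | zero =>
    intro j hn hj
    have hj' : j = key.length := by omega
    rw [aCol]
    have hlen : (if is_key then key.reverse else key).length = key.length := by
      cases is_key <;> simp
    rw [dif_neg (by omega), hj', List.drop_of_length_le (by omega)]
    simp
  | succ n ih =>
    intro j hn hj
    have hjlt : j < key.length := by omega
    have hlen : j < (if is_key then key.reverse else key).length := by cases is_key <;> simpa
    set rows := if is_key then key.reverse else key with hrows
    have hdrop : rows.drop j = rows[j] :: rows.drop (j + 1) := List.drop_eq_getElem_cons hlen
    have hfetch : PySem.List.pyGetD key (if is_key then -((j : Int) + 1) else (j : Int)) "" = rows[j] := by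
      rw [rowFetch key is_key j hjlt, ← hrows, List.getD_eq_getElem _ _ hlen]
    have hcond : (PySem.Str.pyGet? (PySem.List.pyGetD key (if is_key then -((j : Int) + 1) else (j : Int)) "") (k : Int)
        = some '#') ↔ colHash k rows[j].toList = true := by
      rw [hfetch]; exact colHash_char k _
    rw [aCol]
    by_cases hc : colHash k rows[j].toList
    · rw [dif_pos ⟨hjlt, hcond.mpr hc⟩]
      rw [ih (j + 1) (by omega) (by omega), hdrop, List.takeWhile_cons]
      simp [hc]
      omega
    · rw [dif_neg (by rw [not_and]; intro _; rw [hcond]; simp [hc])]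
      rw [hdrop, List.takeWhile_cons]
      simp [hc]

theorem block_eq (key : List String) (is_key : Bool) :
    (PySem.List.pyRange 0 (PySem.Str.len (PySem.List.pyGetD key 0 "")) 1).foldl
        (fun col i => col ++ [ ((aCol key is_key i 0 : Nat) : Int) - 1 ]) []
      = ((if is_key then key.reverse else key).foldl (bStep (PySem.Str.len (PySem.List.pyGetD key 0 "")))
          (List.replicate (PySem.Str.len (PySem.List.pyGetD key 0 "")).toNat 0,
           List.replicate (PySem.Str.len (PySem.List.pyGetD key 0 "")).toNat true)).1.map (fun c => c - 1) := by
  set w := (PySem.List.pyGetD key 0 "").toList.length with hwdef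
  have hlen : PySem.Str.len (PySem.List.pyGetD key 0 "") = (w : Int) := PySem.Str.len_eq _
  rw [hlen]
  have htn : ((w : Int)).toNat = w := rfl
  rw [htn, PySem.List.pyRange_zero_natCast, PySem.List.foldl_append_singleton_eq_map, List.nil_append,
      List.map_map]
  have h0 : (List.replicate w (0 : Int)) = (List.range w).map (fun _ => (0 : Int)) := by simp
  have h1 : (List.replicate w true) = (List.range w).map (fun _ => true) := by simp
  rw [h0, h1, bFold_eq _ w, List.map_map]
  apply List.map_congr_left
  intro k _
  have := aCol_eq key is_key k key.length 0 (by omega) (by omega)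
  simp only [Function.comp, this, List.drop_zero]
  simp

theorem to_vals_eq_alt (blocks : List (List String)) (is_key : Bool) :
    to_vals blocks is_key = to_vals_alt blocks is_key := by
  unfold to_vals to_vals_alt
  rw [PySem.List.foldl_append_singleton_eq_map, PySem.List.foldl_append_singleton_eq_map,
      List.nil_append, List.nil_append]
  apply List.map_congr_left
  intro key _
  exact block_eq key is_key

-- ===== VERDICT (by name: the statement is the Claim_ definition above) =====
theorem to_vals_spec : Claim_equal_to_vals := by
  intro blocks is_key _ _
  exact to_vals_eq_alt blocks is_key
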